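-- pv_equiv track=rewrite | github.com/thakurinbox/basic-algorithm-problems | string/basic/check-string-pangrammatic-lipogram/pangrammatic-lipogram.py | pangrammatic_lipogram
-- ===== SOURCE A (Python) =====
-- def pangrammatic_lipogram(s):
--     alphabets = "abcdefghijklmnopqrstuvwxyz"
--     letter_set = set(list(alphabets))
--     s = s.lower()
--
--     for char in s:
--         letter_set.discard(char)
--         if len(letter_set) == 0:
--             return 'Pangram'
--
--     if len(letter_set) == 1:
--         return 'Pangrammatic Lipogram'
--
--     return 'Not a Pangram but might a Lipogram'
-- ===== SOURCE B (Python) =====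
-- def pangrammatic_lipogram(s):
--     # invert the traversal: scan the alphabet, probe the string; no set at all
--     t = s.lower()
--     missing = sum(1 for c in "abcdefghijklmnopqrstuvwxyz" if c not in t)
--     if missing == 0:
--         return 'Pangram'
--     if missing == 1:
--         return 'Pangrammatic Lipogram'
--     return 'Not a Pangram but might a Lipogram'
-- ===== Notes on version B (the rewrite author's own statement) =====
-- stated objective: alternative
-- what changed: Inverted the traversal: instead of scanning the input while discarding from a 26-letter set with an early-exit return, B keeps no set at all and scans the 26-letter alphabet once, counting via substring membership tests how many letters are absent from the lowercased input, then branches on that count.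
import Mathlib
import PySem

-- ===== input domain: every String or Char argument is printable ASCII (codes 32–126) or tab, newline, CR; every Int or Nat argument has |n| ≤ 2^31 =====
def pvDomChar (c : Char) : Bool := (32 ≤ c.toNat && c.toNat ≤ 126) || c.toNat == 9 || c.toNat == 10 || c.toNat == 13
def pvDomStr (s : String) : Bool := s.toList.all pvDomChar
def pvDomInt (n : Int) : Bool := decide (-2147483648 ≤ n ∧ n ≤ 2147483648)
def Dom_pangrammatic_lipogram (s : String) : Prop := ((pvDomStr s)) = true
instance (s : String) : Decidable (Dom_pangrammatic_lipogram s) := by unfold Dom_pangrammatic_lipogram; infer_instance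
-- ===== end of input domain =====

-- B inverts the traversal: no set at all — it scans the 26-letter alphabet counting, by
-- substring membership tests, the letters absent from the lowercased input (objective: alternative).

-- ===== PORT A =====
-- the 'for char in s' loop with its early 'return Pangram': structural recursion over the chars,
-- carrying letter_set (a Python set of chars)
def pvLoopA : List Char → PySem.Set Char → String
  | [], ls =>
      if PySem.Set.len ls = 1 then "Pangrammatic Lipogram"
      else "Not a Pangram but might a Lipogram"
  | c :: rest, ls =>
      let ls' := PySem.Set.discard ls c
      if PySem.Set.len ls' = 0 then "Pangram" else pvLoopA rest ls'

def pangrammatic_lipogram (s : String) : String :=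
  let alphabets := "abcdefghijklmnopqrstuvwxyz"
  let letter_set : PySem.Set Char := PySem.Set.ofList alphabets.toList
  let s' := PySem.Str.lower s
  pvLoopA s'.toList letter_set

-- ===== PORT B =====
-- 'sum(1 for c in alphabet if c not in t)' = countP over the alphabet's chars;
-- 'c not in t' with c a single char is exactly char non-membership in t's chars
def pangrammatic_lipogram_alt (s : String) : String :=
  let t := PySem.Str.lower s
  let missing : Nat :=
    List.countP (fun c => !(t.toList.contains c)) "abcdefghijklmnopqrstuvwxyz".toList
  if missing = 0 then "Pangram"
  else if missing = 1 then "Pangrammatic Lipogram"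
  else "Not a Pangram but might a Lipogram"

-- ===== PRECONDITION & SPEC =====
def Spec_pangrammatic_lipogram (s : String) (out : String) : Prop := out = pangrammatic_lipogram_alt s
instance (s : String) (out : String) : Decidable (Spec_pangrammatic_lipogram s out) := by unfold Spec_pangrammatic_lipogram; infer_instance

-- ===== CLAIM (what is proved, stated in full; the proofs are below) =====
def Claim_equal_pangrammatic_lipogram : Prop := ∀ (s : String), Dom_pangrammatic_lipogram s → Spec_pangrammatic_lipogram s (pangrammatic_lipogram s)

-- ===== LEMMAS AND PROOFS =====

-- the common three-way classification by the number of missing letters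
def pvClassify (n : Nat) : String :=
  if n = 0 then "Pangram"
  else if n = 1 then "Pangrammatic Lipogram"
  else "Not a Pangram but might a Lipogram"

lemma pvLen_eq (s : PySem.Set Char) : PySem.Set.len s = (s.length : Int) := by
  simp [PySem.Set.len]

lemma pvLength_eq_of_same_mem {l₁ l₂ : List Char} (h₁ : l₁.Nodup) (h₂ : l₂.Nodup)
    (h : ∀ x, x ∈ l₁ ↔ x ∈ l₂) : l₁.length = l₂.length :=
  ((List.perm_ext_iff_of_nodup h₁ h₂).2 h).length_eq

lemma pvLoopA_classify (cs : List Char) : ∀ (ls : PySem.Set Char), ls.Nodup → ls ≠ [] →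
    pvLoopA cs ls = pvClassify ((ls.filter (fun x => !cs.contains x)).length) := by
  induction cs with
  | nil =>
    intro ls hn hne
    have hlen : ls.length ≠ 0 := by simp [List.length_eq_zero_iff, hne]
    have hf : ls.filter (fun x => !([] : List Char).contains x) = ls := by simp
    simp only [pvLoopA]
    rw [hf, pvLen_eq, pvClassify, if_neg hlen]
    split_ifs <;> simp_all
  | cons c rest ih =>
    intro ls hn hne
    simp only [pvLoopA]
    have hmem : ∀ x, x ∈ PySem.Set.discard ls c ↔ x ∈ ls ∧ x ≠ c :=
      fun x => PySem.Set.mem_discard ls c x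
    have hnd : (PySem.Set.discard ls c).Nodup := PySem.Set.nodup_discard ls c hn
    by_cases hz : PySem.Set.discard ls c = []
    · -- early exit: the set became empty, remaining letters all filtered away too
      have hfil : ls.filter (fun x => !(c :: rest).contains x) = [] := by
        rw [List.eq_nil_iff_forall_not_mem]
        intro x hx
        rw [List.mem_filter] at hx
        obtain ⟨hxl, hxc⟩ := hx
        simp at hxc
        have : x ∈ PySem.Set.discard ls c := (hmem x).2 ⟨hxl, hxc.1⟩
        simp [hz] at this
      rw [hfil, pvLen_eq, hz]
      simp [pvClassify]
    · have hlen : PySem.Set.len (PySem.Set.discard ls c) ≠ 0 := by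
        rw [pvLen_eq]
        simp [List.length_eq_zero_iff, hz]
      rw [if_neg hlen, ih _ hnd hz]
      congr 1
      apply pvLength_eq_of_same_mem (List.Nodup.filter _ hnd) (List.Nodup.filter _ hn)
      intro x
      simp only [List.mem_filter, hmem]
      simp
      tauto

lemma pvAlpha_nodup : ("abcdefghijklmnopqrstuvwxyz".toList).Nodup := by decide

-- ===== VERDICT (by name: the statement is the Claim_ definition above) =====
theorem pangrammatic_lipogram_spec : Claim_equal_pangrammatic_lipogram := by
  intro s _
  unfold Spec_pangrammatic_lipogram pangrammatic_lipogram pangrammatic_lipogram_alt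
  simp only []
  have halpha : PySem.Set.ofList "abcdefghijklmnopqrstuvwxyz".toList
      = "abcdefghijklmnopqrstuvwxyz".toList :=
    PySem.Set.ofList_eq_self_of_nodup _ pvAlpha_nodup
  set low := (PySem.Str.lower s).toList with hlow
  rw [halpha, pvLoopA_classify low _ pvAlpha_nodup (by decide)]
  -- B counts, over the alphabet, the letters absent from low: that countP IS the
  -- length of the filtered alphabet list that classifies A's result
  rw [List.countP_eq_length_filter]
  unfold pvClassify
  split_ifs <;> rfl
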